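-- pv_equiv track=rewrite | github.com/hocvo/AdventOfCode | 2022/d9.py | isTouch
-- ===== SOURCE A (Python) =====
-- n = [[0,1],[0,-1],[1,0],[-1,0],[1,1],[1,-1],[-1,1],[-1,-1]]
--
-- def isTouch(head, tail):
--     if head == tail:
--         return True
--     around = []
--     for neighbor in n:
--         r = head[0]+neighbor[0]
--         c = head[1]+neighbor[1]
--         around.append((r,c))
--     if tail in around:
--         return True
--     return False
-- ===== SOURCE B (Python) =====
-- def isTouch(head, tail):
--     return abs(head[0] - tail[0]) <= 1 and abs(head[1] - tail[1]) <= 1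
-- ===== Notes on version B (the rewrite author's own statement) =====
-- stated objective: simpler
-- what changed: Replaces the eight-neighbour table construction and membership scan with a direct closed-form Chebyshev-distance check on the two coordinates.
-- intended difference: On 2-element points where tail is adjacent to (but not equal to) head (both coordinate differences at most 1), A returns False because it compares the list tail against the tuples it built, so the membership test never fires, while B returns True, the intended 'touching' answer. — e.g. on isTouch([0, 0], [0, 1]): A returns false, B returns true
-- outside the precondition, e.g. on isTouch([1, 2], [1]): A returns False, B raises IndexError
import Mathlib
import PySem

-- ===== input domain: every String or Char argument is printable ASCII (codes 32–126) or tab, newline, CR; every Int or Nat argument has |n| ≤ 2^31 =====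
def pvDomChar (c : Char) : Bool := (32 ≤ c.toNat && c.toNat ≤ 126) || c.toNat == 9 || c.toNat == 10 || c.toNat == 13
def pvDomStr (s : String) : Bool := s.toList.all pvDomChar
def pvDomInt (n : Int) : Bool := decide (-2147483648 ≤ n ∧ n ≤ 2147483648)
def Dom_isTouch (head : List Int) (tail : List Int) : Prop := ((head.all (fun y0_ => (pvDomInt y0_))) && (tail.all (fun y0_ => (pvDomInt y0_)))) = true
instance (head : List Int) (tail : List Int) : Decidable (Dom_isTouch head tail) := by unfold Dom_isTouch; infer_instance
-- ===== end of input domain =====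

-- B replaces A's eight-neighbour table and membership scan with a direct Chebyshev-distance
-- check; A's membership test compares the list `tail` against tuples, so it never fires
-- (stated as the intended difference D_ below). Objective: simpler.

-- ===== PORT A =====
-- the module-level neighbour table `n`
def nTbl : List (Int × Int) := [(0,1),(0,-1),(1,0),(-1,0),(1,1),(1,-1),(-1,1),(-1,-1)]

-- Python's `tail in around`: `around` holds TUPLES, `tail` is a LIST; in Python
-- `list == tuple` is always False, so each comparison is False (exact).
def pyListEqTuple (xs : List Int) (t : Int × Int) : Bool := false

def isTouch (head : List Int) (tail : List Int) : Bool :=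
  if head = tail then true
  else
    -- head[0]/head[1]: in range on Pre_ (length 2); getD is exact there
    let around := nTbl.foldl (fun acc nb =>
      acc ++ [(head.getD 0 0 + nb.1, head.getD 1 0 + nb.2)]) []
    if around.any (fun p => pyListEqTuple tail p) then true
    else false

-- ===== PORT B =====
def isTouch_alt (head : List Int) (tail : List Int) : Bool :=
  decide (|head.getD 0 0 - tail.getD 0 0| ≤ 1) && decide (|head.getD 1 0 - tail.getD 1 0| ≤ 1)

-- ===== PRECONDITION & SPEC =====
-- Pre_ requires both points to carry at least two coordinates: A raises IndexError when
-- head ≠ tail and head has fewer than 2 elements, and B indexes both points (so it raises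
-- on short tails, where A returns False or True without ever reading tail's elements).
def Pre_isTouch (head : List Int) (tail : List Int) : Prop :=
  2 ≤ head.length ∧ 2 ≤ tail.length
instance (head : List Int) (tail : List Int) : Decidable (Pre_isTouch head tail) := by unfold Pre_isTouch; infer_instance
def pvWitness_isTouch : List Int × List Int := ([0, 0], [5, 5])

-- On 2-element points where tail is adjacent to (but not equal to) head, A returns False
-- because it compares the list tail against the tuples it built, while B returns True,
-- the intended 'touching' answer.
def D_isTouch (head : List Int) (tail : List Int) : Prop :=
  match head, tail with
  | h0 :: h1 :: _, t0 :: t1 :: _ =>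
      head ≠ tail ∧ h0 - t0 ≤ 1 ∧ t0 - h0 ≤ 1 ∧ h1 - t1 ≤ 1 ∧ t1 - h1 ≤ 1
  | _, _ => False
instance (head : List Int) (tail : List Int) : Decidable (D_isTouch head tail) := by
  unfold D_isTouch
  rcases head with _ | ⟨a, _ | ⟨b, _ | _⟩⟩ <;> rcases tail with _ | ⟨c, _ | ⟨d, _ | _⟩⟩ <;>
    dsimp only <;> infer_instance

def Spec_isTouch (head : List Int) (tail : List Int) (out : Bool) : Prop := ¬ D_isTouch head tail → out = isTouch_alt head tail
instance (head : List Int) (tail : List Int) (out : Bool) : Decidable (Spec_isTouch head tail out) := by unfold Spec_isTouch; infer_instance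

def pvDiffWitness_isTouch : List Int × List Int := ([0, 0], [0, 1])
def pvDiffWitnessOut_isTouch : Bool × Bool := (false, true)

-- ===== CLAIM (what is proved, stated in full; the proofs are below) =====
def Claim_unchanged_isTouch : Prop := ∀ (head : List Int) (tail : List Int), Dom_isTouch head tail → Pre_isTouch head tail → Spec_isTouch head tail (isTouch head tail)
def Claim_changed_isTouch : Prop := Dom_isTouch (pvDiffWitness_isTouch.1) (pvDiffWitness_isTouch.2) ∧ Pre_isTouch (pvDiffWitness_isTouch.1) (pvDiffWitness_isTouch.2) ∧ D_isTouch (pvDiffWitness_isTouch.1) (pvDiffWitness_isTouch.2) ∧ isTouch (pvDiffWitness_isTouch.1) (pvDiffWitness_isTouch.2) = pvDiffWitnessOut_isTouch.1 ∧ isTouch_alt (pvDiffWitness_isTouch.1) (pvDiffWitness_isTouch.2) = pvDiffWitnessOut_isTouch.2 ∧ pvDiffWitnessOut_isTouch.1 ≠ pvDiffWitnessOut_isTouch.2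
def Claim_exact_isTouch : Prop := ∀ (head : List Int) (tail : List Int), Dom_isTouch head tail → Pre_isTouch head tail → D_isTouch head tail → isTouch head tail ≠ isTouch_alt head tail

-- ===== LEMMAS AND PROOFS =====
-- A's membership scan never succeeds, so A reduces to the equality test.
theorem isTouch_eq (head tail : List Int) : isTouch head tail = decide (head = tail) := by
  by_cases h : head = tail <;> simp [isTouch, h, pyListEqTuple]

-- ===== VERDICT (by name: the statement is the Claim_ definition above) =====
theorem isTouch_spec : Claim_unchanged_isTouch := by
  intro head tail _ hpre hnd
  obtain ⟨hl1, hl2⟩ := hpre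
  rcases head with _ | ⟨h0, _ | ⟨h1, hr⟩⟩
  · simp at hl1
  · simp at hl1
  rcases tail with _ | ⟨t0, _ | ⟨t1, tr⟩⟩
  · simp at hl2
  · simp at hl2
  rw [isTouch_eq]
  unfold D_isTouch at hnd
  unfold isTouch_alt
  simp only [List.getD_cons_zero, List.getD_cons_succ] at *
  by_cases e : (h0 :: h1 :: hr : List Int) = t0 :: t1 :: tr
  · rw [e, decide_eq_true rfl]
    injection e with a b; injection b with b _
    subst a; subst b
    simp
  · have hc : ¬ (|h0 - t0| ≤ 1 ∧ |h1 - t1| ≤ 1) := by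
      intro hc
      have a1 := abs_le.mp hc.1
      have a2 := abs_le.mp hc.2
      exact hnd ⟨e, by omega, by omega, by omega, by omega⟩
    rcases not_and_or.mp hc with h1' | h2'
    · rw [decide_eq_false h1', Bool.false_and, decide_eq_false e]
    · rw [decide_eq_false h2', Bool.and_false, decide_eq_false e]

theorem isTouch_changed : Claim_changed_isTouch := by unfold Claim_changed_isTouch; decide

theorem isTouch_tight : Claim_exact_isTouch := by
  intro head tail _ hpre hd
  obtain ⟨hl1, hl2⟩ := hpre
  rcases head with _ | ⟨h0, _ | ⟨h1, hr⟩⟩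
  · simp at hl1
  · simp at hl1
  rcases tail with _ | ⟨t0, _ | ⟨t1, tr⟩⟩
  · simp at hl2
  · simp at hl2
  unfold D_isTouch at hd
  obtain ⟨e, b1, b2, b3, b4⟩ := hd
  rw [isTouch_eq]
  unfold isTouch_alt
  simp only [List.getD_cons_zero, List.getD_cons_succ]
  rw [decide_eq_false e, decide_eq_true (abs_le.mpr ⟨by omega, by omega⟩ : |h0 - t0| ≤ 1),
      decide_eq_true (abs_le.mpr ⟨by omega, by omega⟩ : |h1 - t1| ≤ 1), Bool.and_self]
  exact Bool.false_ne_true
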